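-- pv_equiv track=rewrite | github.com/alicepywong/CS61A | hw/hw04/hw04.py | remove_odd_indices
-- ===== SOURCE A (Python) =====
-- def remove_odd_indices(lst, odd):
--     """Remove elements of lst that have odd indices. Use recursion!
--
--     >>> s = [1, 2, 3, 4]
--     >>> t = remove_odd_indices(s, True)
--     >>> s
--     [1, 2, 3, 4]
--     >>> t
--     [1, 3]
--     >>> l = [5, 6, 7, 8]
--     >>> m = remove_odd_indices(l, False)
--     >>> m
--     [6, 8]
--     >>> remove_odd_indices([9, 8, 7, 6, 5, 4, 3], False)
--     [8, 6, 4]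
--     >>> remove_odd_indices([2], False)
--     []
--     >>> # Do not use while/for loops!
--     >>> from construct_check import check
--     >>> # ban iteration
--     >>> check(HW_SOURCE_FILE, 'remove_odd_indices',
--     ...       ['While', 'For'])
--     True
--     """
--     "*** YOUR CODE HERE ***"
--     if not lst:
--         return []
--     elif len(lst) == 1:
--         return [lst[0]] if odd else []
--     elif odd:
--         return [lst[0]] + remove_odd_indices(lst[2:], odd)
--     else:
--         return [lst[1]] + remove_odd_indices(lst[2:], odd)
-- ===== SOURCE B (Python) =====
-- def remove_odd_indices(lst, odd):
--     """Keep the even-indexed elements if odd is True, else the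
--     odd-indexed ones, by a single filtering pass over enumerate."""
--     r = 0 if odd else 1
--     return [x for i, x in enumerate(lst) if i % 2 == r]
-- ===== Notes on version B (the rewrite author's own statement) =====
-- stated objective: idiomatic
-- what changed: Replaces A's step-by-2 slicing recursion with paired branches and a len==1 special case by a single non-recursive filtering pass over enumerate keyed on index parity.
import Mathlib
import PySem

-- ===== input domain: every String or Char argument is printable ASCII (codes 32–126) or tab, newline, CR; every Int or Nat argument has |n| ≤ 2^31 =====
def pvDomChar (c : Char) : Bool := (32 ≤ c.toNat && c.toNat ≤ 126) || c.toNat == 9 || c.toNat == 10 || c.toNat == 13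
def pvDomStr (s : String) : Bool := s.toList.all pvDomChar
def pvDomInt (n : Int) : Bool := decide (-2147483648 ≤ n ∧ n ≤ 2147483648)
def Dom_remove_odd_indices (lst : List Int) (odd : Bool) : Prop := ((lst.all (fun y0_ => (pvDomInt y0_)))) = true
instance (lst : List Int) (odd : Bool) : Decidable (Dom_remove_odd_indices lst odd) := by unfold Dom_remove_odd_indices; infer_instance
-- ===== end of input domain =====

-- B replaces A's two-at-a-time slicing recursion by a single non-recursive filtering pass over enumerate (objective: idiomatic).


-- ===== PORT A =====
-- A: empty / singleton / two-at-a-time recursion; lst[2:] transcribed as the tail after two elements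
def remove_odd_indices (lst : List Int) (odd : Bool) : List Int :=
  match lst with
  | [] => []
  | [x] => if odd then [x] else []
  | x :: y :: rest =>
      if odd then [x] ++ remove_odd_indices rest odd
      else [y] ++ remove_odd_indices rest odd

-- ===== PORT B =====
-- B: one filtering pass over enumerate, keeping indices of parity r
def remove_odd_indices_alt (lst : List Int) (odd : Bool) : List Int :=
  let r : Int := if odd then 0 else 1
  ((PySem.List.enumerate lst 0).filter (fun p => p.1 % 2 == r)).map Prod.snd

-- ===== PRECONDITION & SPEC =====
def Spec_remove_odd_indices (lst : List Int) (odd : Bool) (out : List Int) : Prop := out = remove_odd_indices_alt lst odd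
instance (lst : List Int) (odd : Bool) (out : List Int) : Decidable (Spec_remove_odd_indices lst odd out) := by unfold Spec_remove_odd_indices; infer_instance

-- ===== CLAIM (what is proved, stated in full; the proofs are below) =====
def Claim_equal_remove_odd_indices : Prop := ∀ (lst : List Int) (odd : Bool), Dom_remove_odd_indices lst odd → Spec_remove_odd_indices lst odd (remove_odd_indices lst odd)

-- ===== LEMMAS AND PROOFS =====

-- ===== VERDICT (by name: the statement is the Claim_ definition above) =====
-- the filtered-enumerate pass, generalized over an even start index, equals A's recursion
theorem filter_enum_eq : ∀ (lst : List Int) (odd : Bool) (s : Int), s % 2 = 0 →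
    ((PySem.List.enumerate lst s).filter
        (fun p => p.1 % 2 == (if odd then (0:Int) else 1))).map Prod.snd
      = remove_odd_indices lst odd
  | [], odd, s, hs => by cases odd <;> simp [PySem.List.enumerate_nil, remove_odd_indices]
  | [x], odd, s, hs => by
      cases odd <;>
        simp [PySem.List.enumerate_cons, PySem.List.enumerate_nil,
              List.filter, remove_odd_indices, hs]
  | x :: y :: rest, odd, s, hs => by
      have h1 : (s + 1) % 2 = 1 := by omega
      have h2 : (s + 1 + 1) % 2 = 0 := by omega
      have ih := filter_enum_eq rest odd (s + 1 + 1) h2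
      cases odd <;>
        simp_all [PySem.List.enumerate_cons, List.filter, remove_odd_indices]

theorem remove_odd_indices_spec : Claim_equal_remove_odd_indices := by
  intro lst odd _
  show remove_odd_indices lst odd = remove_odd_indices_alt lst odd
  exact (filter_enum_eq lst odd 0 rfl).symm
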